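-- pv_equiv track=rewrite | github.com/4D42/LateX_MFWM | MFWM.py | XPM_SPM
-- ===== SOURCE A (Python) =====
-- def XPM_SPM(n,N):
-- 	text = "+i\gamma & \\left(|A_"+str(n)+"|^2"
-- 	counter = 0 #counter ton count the number of terms on a line
--
-- 	Q = list(range(1,N+1))
-- 	Q.remove(n)
--
-- 	for q in Q:
-- 		if counter == 5:
-- 			#add the line jump
-- 			text+="\\right.\\\\\\nonumber\n&\\left."
-- 			counter = 0
--
-- 		text += "+2|A_"+str(q)+"|^2"
-- 		counter += 1
-- 	text += "\\right)A_"+str(n)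
-- 	return text
-- ===== SOURCE B (Python) =====
-- def XPM_SPM(n, N):
--     Q = list(range(1, N + 1))
--     Q.remove(n)
--     terms = ["+2|A_" + str(q) + "|^2" for q in Q]
--     groups = []
--     i = 0
--     while i < len(terms):
--         groups.append("".join(terms[i:i + 5]))
--         i += 5
--     body = "\\right.\\\\\\nonumber\n&\\left.".join(groups)
--     return "+i\\gamma & \\left(|A_" + str(n) + "|^2" + body + "\\right)A_" + str(n)
-- ===== Notes on version B (the rewrite author's own statement) =====
-- stated objective: simpler
-- what changed: Replaces the running line-wrap counter threaded through the accumulation loop by a declarative pipeline: build the list of term strings, chunk it into groups of five by slicing, and join the groups with the line-break separator.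
import Mathlib
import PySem

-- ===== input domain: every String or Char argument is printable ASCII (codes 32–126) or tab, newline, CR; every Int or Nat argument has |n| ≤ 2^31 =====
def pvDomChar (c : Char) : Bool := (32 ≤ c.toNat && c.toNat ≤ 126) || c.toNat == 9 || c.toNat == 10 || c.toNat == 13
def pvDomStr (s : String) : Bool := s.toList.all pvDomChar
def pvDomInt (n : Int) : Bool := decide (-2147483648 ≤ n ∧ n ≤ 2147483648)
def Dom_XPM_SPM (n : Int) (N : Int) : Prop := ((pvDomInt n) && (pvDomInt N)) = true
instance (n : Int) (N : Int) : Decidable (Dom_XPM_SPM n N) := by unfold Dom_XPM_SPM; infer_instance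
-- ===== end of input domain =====

-- B replaces A's running line-wrap counter by a chunk-the-term-list-and-join pipeline (objective: simpler).

-- ===== PORT A =====
-- A's loop accumulates (text, counter); counter==5 triggers the line-break insertion.
def XPM_SPM (n : Int) (N : Int) : String :=
  let text := "+i\\gamma & \\left(|A_".toList ++ PySem.Int.toChars n ++ "|^2".toList
  match PySem.List.remove? (PySem.List.pyRange 1 (N + 1) 1) n with
  | none => ""  -- Q.remove(n) raises ValueError here; excluded by Pre_
  | some Q =>
      let st := Q.foldl (fun (st : List Char × Int) q =>
        let st2 := if st.2 == 5 then (st.1 ++ "\\right.\\\\\\nonumber\n&\\left.".toList, (0 : Int)) else st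
        (st2.1 ++ "+2|A_".toList ++ PySem.Int.toChars q ++ "|^2".toList, st2.2 + 1)) (text, 0)
      String.ofList (st.1 ++ "\\right)A_".toList ++ PySem.Int.toChars n)

-- ===== PORT B =====
-- the 'while i < len(terms): groups.append("".join(terms[i:i+5])); i += 5' loop of Source B
def XPM_groups (terms : List (List Char)) (i : Int) : List (List Char) :=
  if _h : i < terms.length then
    PySem.Chars.join [] (PySem.List.slice terms (some i) (some (i + 5))) ::
      XPM_groups terms (i + 5)
  else []
termination_by ((terms.length : Int) - i).toNat
decreasing_by omega

def XPM_SPM_alt (n : Int) (N : Int) : String :=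
  match PySem.List.remove? (PySem.List.pyRange 1 (N + 1) 1) n with
  | none => ""  -- Q.remove(n) raises ValueError here; excluded by Pre_
  | some Q =>
      let terms := Q.map (fun q => "+2|A_".toList ++ PySem.Int.toChars q ++ "|^2".toList)
      let body := PySem.Chars.join "\\right.\\\\\\nonumber\n&\\left.".toList (XPM_groups terms 0)
      String.ofList ("+i\\gamma & \\left(|A_".toList ++ PySem.Int.toChars n ++ "|^2".toList ++
        body ++ "\\right)A_".toList ++ PySem.Int.toChars n)

-- ===== PRECONDITION & SPEC =====
-- Pre_ excludes exactly the inputs on which Python's Q.remove(n) raises ValueError (n not in 1..N).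
def Pre_XPM_SPM (n : Int) (N : Int) : Prop := 1 ≤ n ∧ n ≤ N
instance (n : Int) (N : Int) : Decidable (Pre_XPM_SPM n N) := by unfold Pre_XPM_SPM; infer_instance
def pvWitness_XPM_SPM : Int × Int := (2, 9)

def Spec_XPM_SPM (n : Int) (N : Int) (out : String) : Prop := out = XPM_SPM_alt n N
instance (n : Int) (N : Int) (out : String) : Decidable (Spec_XPM_SPM n N out) := by unfold Spec_XPM_SPM; infer_instance

-- ===== CLAIM (what is proved, stated in full; the proofs are below) =====
def Claim_equal_XPM_SPM : Prop := ∀ (n : Int) (N : Int), Dom_XPM_SPM n N → Pre_XPM_SPM n N → Spec_XPM_SPM n N (XPM_SPM n N)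

-- ===== LEMMAS AND PROOFS =====

-- proof-side abbreviations for the three string pieces
def sepC : List Char := "\\right.\\\\\\nonumber\n&\\left.".toList
def termC (q : Int) : List Char := "+2|A_".toList ++ PySem.Int.toChars q ++ "|^2".toList

-- what A's loop appends after the header, as a function of the remaining terms and the counter
def render (ts : List (List Char)) (c : Int) : List Char :=
  match ts with
  | [] => []
  | t :: rest => if c == 5 then sepC ++ t ++ render rest 1 else t ++ render rest (c + 1)

lemma lemA (qs : List Int) : ∀ (acc : List Char) (c : Int),
    (qs.foldl (fun (st : List Char × Int) q =>
        let st2 := if st.2 == 5 then (st.1 ++ "\\right.\\\\\\nonumber\n&\\left.".toList, (0 : Int)) else st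
        (st2.1 ++ "+2|A_".toList ++ PySem.Int.toChars q ++ "|^2".toList, st2.2 + 1)) (acc, c)).1
      = acc ++ render (qs.map termC) c := by
  induction qs with
  | nil => intro acc c; simp [render]
  | cons q qs ih =>
      intro acc c
      by_cases h : c = 5
      · subst h
        simp only [List.foldl_cons, List.map_cons, render, BEq.rfl, if_true, ih]
        simp [sepC, termC]
      · have hb : (c == 5) = false := by simpa using h
        simp only [List.foldl_cons, List.map_cons, render, hb, Bool.false_eq_true, if_false, ih]
        simp [termC]

lemma render_five (ts : List (List Char)) :
    render ts 5 = if ts = [] then [] else sepC ++ render ts 0 := by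
  cases ts with
  | nil => simp [render]
  | cons t rest => simp [render]

lemma join_nil_flatten (l : List (List Char)) : PySem.Chars.join [] l = l.flatten := by
  induction l with
  | nil => simp [PySem.Chars.join, List.intercalate]
  | cons x xs ih =>
      cases xs with
      | nil => simp [PySem.Chars.join, List.intercalate]
      | cons y ys =>
          simp [PySem.Chars.join, List.intercalate, List.intersperse] at ih ⊢
          simpa using ih

-- recursion structure of Source B's grouping loop, phrased on the suffix it still has to process
def chunksTD : List (List Char) → List (List Char)
  | [] => []
  | t :: rest => ((t :: rest).take 5).flatten :: chunksTD ((t :: rest).drop 5)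
termination_by ts => ts.length
decreasing_by simp

lemma chunksTD_nil : chunksTD [] = [] := by rw [chunksTD]

lemma groups_eq (k : Nat) : ∀ (ts : List (List Char)) (i : Int), 0 ≤ i →
    ((ts.length : Int) - i).toNat ≤ k → XPM_groups ts i = chunksTD (ts.drop i.toNat) := by
  induction k with
  | zero =>
      intro ts i h0 hk
      rw [XPM_groups, dif_neg (by omega : ¬ (i < (ts.length : Int)))]
      have hd : ts.drop i.toNat = [] := List.drop_eq_nil_of_le (by omega)
      rw [hd, chunksTD_nil]
  | succ k ih =>
      intro ts i h0 hk
      rw [XPM_groups]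
      by_cases hlt : i < (ts.length : Int)
      · rw [dif_pos hlt]
        have hsl : PySem.List.slice ts (some i) (some (i + 5)) = (ts.drop i.toNat).take 5 := by
          rw [PySem.List.slice_toNat ts h0 (by omega)]
          congr 1
          omega
        have hdrop : ts.drop i.toNat ≠ [] := by
          intro h
          have := List.drop_eq_nil_iff.mp h
          omega
        obtain ⟨t, rest, hco⟩ := List.exists_cons_of_ne_nil hdrop
        rw [hsl, join_nil_flatten, ih ts (i + 5) (by omega) (by omega), hco, chunksTD]
        have : ts.drop (i + 5).toNat = (t :: rest).drop 5 := by
          rw [← hco, List.drop_drop]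
          congr 1
          omega
        rw [this]
      · rw [dif_neg hlt]
        have hd : ts.drop i.toNat = [] := List.drop_eq_nil_of_le (by omega)
        rw [hd, chunksTD_nil]

lemma chunks_cons (t : List Char) (rest : List (List Char)) :
    chunksTD (t :: rest) = ((t :: rest).take 5).flatten :: chunksTD ((t :: rest).drop 5) := by
  rw [chunksTD]

lemma groups_all (ts : List (List Char)) : XPM_groups ts 0 = chunksTD ts := by
  have h := groups_eq ((ts.length : Int) - 0).toNat ts 0 le_rfl le_rfl
  simpa using h

lemma join_cons (sep : List Char) (x : List Char) (xs : List (List Char)) :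
    PySem.Chars.join sep (x :: xs) = x ++ (if xs = [] then [] else sep ++ PySem.Chars.join sep xs) := by
  cases xs with
  | nil => simp [PySem.Chars.join, List.intercalate]
  | cons y ys => simp [PySem.Chars.join, List.intercalate, List.intersperse]

def bodyJ (ts : List (List Char)) : List Char := PySem.Chars.join sepC (chunksTD ts)

lemma chunks_nil_iff (ts : List (List Char)) : chunksTD ts = [] ↔ ts = [] := by
  cases ts with
  | nil => simp [chunksTD_nil]
  | cons t rest => rw [chunks_cons]; simp

lemma bodyJ_cons (ts : List (List Char)) (h : ts ≠ []) :
    bodyJ ts = (ts.take 5).flatten ++ (if ts.drop 5 = [] then [] else sepC ++ bodyJ (ts.drop 5)) := by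
  obtain ⟨t, rest, rfl⟩ := List.exists_cons_of_ne_nil h
  rw [bodyJ, chunks_cons, join_cons]
  simp only [chunks_nil_iff]
  rfl

lemma lemT (ts : List (List Char)) : ∀ (c : Int), 0 ≤ c → c < 5 →
    render ts c = (ts.take (5 - c.toNat)).flatten ++
      (if ts.drop (5 - c.toNat) = [] then [] else sepC ++ bodyJ (ts.drop (5 - c.toNat))) := by
  induction ts with
  | nil => intro c _ _; simp [render]
  | cons t rest ih =>
      intro c h0 h5
      have hb : (c == 5) = false := beq_eq_false_iff_ne.mpr (by omega)
      have hk : 5 - c.toNat = (5 - (c + 1).toNat) + 1 := by omega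
      rw [render]
      simp only [hb, Bool.false_eq_true, if_false]
      by_cases hc : c + 1 < 5
      · rw [ih (c + 1) (by omega) hc, hk]
        simp [List.append_assoc]
      · -- c = 4 : next counter value is 5
        have hc4 : c = 4 := by omega
        subst hc4
        norm_num [render_five]
        by_cases hr : rest = []
        · simp [hr]
        · have hrb : render rest 0 = bodyJ rest := by
            rw [ih 0 le_rfl (by norm_num), bodyJ_cons rest hr]
            norm_num
          simp [hr, hrb]

lemma render_zero (ts : List (List Char)) : render ts 0 = bodyJ ts := by
  cases ts with
  | nil => simp [render, bodyJ, chunksTD_nil, PySem.Chars.join, List.intercalate]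
  | cons t rest =>
      rw [lemT (t :: rest) 0 (by norm_num) (by norm_num), bodyJ_cons (t :: rest) (by simp)]
      norm_num

-- ===== VERDICT (by name: the statement is the Claim_ definition above) =====
theorem XPM_SPM_spec : Claim_equal_XPM_SPM := by
  intro n N _ hpre
  obtain ⟨h1, h2⟩ := hpre
  have hmem : n ∈ PySem.List.pyRange 1 (N + 1) 1 := by
    rw [PySem.List.mem_pyRange_one]; omega
  have hrem := PySem.List.remove?_eq_some_erase (PySem.List.pyRange 1 (N + 1) 1) n hmem
  unfold Spec_XPM_SPM XPM_SPM XPM_SPM_alt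
  rw [hrem]
  simp only []
  rw [lemA]
  rw [render_zero]
  rw [groups_all]
  rfl
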